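-- pv_equiv track=rewrite | github.com/dahaelee/Algorithm-Study | Programmers/Level2/땅따먹기.py | solution
-- ===== SOURCE A (Python) =====
-- def solution(land):
--     n = len(land)
--
--     # 각 원소값을 (자기 자신 + 이전행에서 같은 열 제외한 최대값) 으로 바꾸면서 모든 행을 탐색
--     for i in range(1, n):
--         for j in range(0, 4):
--             land[i][j] = land[i][j] + max(land[i - 1][:j] + land[i - 1][j + 1:])
--
--         ''' 내부 for문과 동일한 코드
--         land[i][0] = land[i][0] + max(land[i-1][1], land[i-1][2], land[i-1][3])
--         land[i][1] = land[i][1] + max(land[i-1][0], land[i-1][2], land[i-1][3])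
--         land[i][2] = land[i][2] + max(land[i-1][0], land[i-1][1], land[i-1][3])
--         land[i][3] = land[i][3] + max(land[i-1][0], land[i-1][1], land[i-1][2])
--         '''
--
--     # 답은 마지막 행의 최대값
--     answer = max(land[-1])
--
--     return answer
-- ===== SOURCE B (Python) =====
-- def solution(land):
--     n = len(land)
--     # One forward pass per previous row keeps (best value, its index, second-best),
--     # so each row update needs no slicing/re-scanning. Mutates land in place like A.
--     for i in range(1, n):
--         prev = land[i - 1]
--         best = second = None
--         best_j = j = 0
--         for v in prev:
--             if best is None or v > best:
--                 second = best
--                 best = v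
--                 best_j = j
--             elif second is None or v > second:
--                 second = v
--             j += 1
--         for j in range(4):
--             land[i][j] += second if j == best_j else best
--     return max(land[-1])
-- ===== Notes on version B (the rewrite author's own statement) =====
-- stated objective: faster
-- what changed: Each row's excluded-column maximum is taken from one forward pass over the previous row that maintains (best value, its first index, second-best value), instead of A's four slice-concatenate-and-rescan max() calls per row; B performs the same in-place mutation of land.
import Mathlib
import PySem

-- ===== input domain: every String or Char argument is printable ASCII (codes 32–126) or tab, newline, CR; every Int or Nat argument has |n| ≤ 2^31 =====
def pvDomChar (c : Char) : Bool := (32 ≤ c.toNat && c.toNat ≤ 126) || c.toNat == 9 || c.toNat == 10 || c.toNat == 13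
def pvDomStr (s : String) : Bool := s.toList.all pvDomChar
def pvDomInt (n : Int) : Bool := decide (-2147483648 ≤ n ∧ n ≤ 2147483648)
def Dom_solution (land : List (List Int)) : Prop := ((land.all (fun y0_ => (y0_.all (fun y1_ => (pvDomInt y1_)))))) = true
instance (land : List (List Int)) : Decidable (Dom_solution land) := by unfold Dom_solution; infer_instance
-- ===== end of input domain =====

-- B replaces A's four sliced re-scans of the previous row by one forward pass keeping
-- (best, index of best, second best); both mutate `land` in place identically, and the
-- equivalence proved covers the return value (the mutation is the same pySetD sequence).

-- ===== PORT A =====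
-- land[i][j] = land[i][j] + max(land[i-1][:j] + land[i-1][j+1:]); the .getD 0 defaults
-- of pyGetD/pySetD/max? are unreachable under Pre_solution (Python would raise there).
def stepA (i : Int) (L : List (List Int)) (j : Int) : List (List Int) :=
  let prev := PySem.List.pyGetD L (i - 1) []
  let row := PySem.List.pyGetD L i []
  PySem.List.pySetD L i (PySem.List.pySetD row j (PySem.List.pyGetD row j 0 +
    (PySem.List.max? (PySem.List.slice prev none (some j) ++ PySem.List.slice prev (some (j + 1)) none)
      (fun y => y)).getD 0))

def solution (land : List (List Int)) : Int :=
  let n : Int := land.length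
  let land2 := (PySem.List.pyRange 1 n 1).foldl
    (fun L i => (PySem.List.pyRange 0 4 1).foldl (stepA i) L) land
  (PySem.List.max? (PySem.List.pyGetD land2 (-1) []) (fun y => y)).getD 0

-- ===== PORT B =====
-- one pass over prev: state (best, second, best_j, j); None → Option.none
def scanStep (st : Option Int × Option Int × Int × Int) (v : Int) :
    Option Int × Option Int × Int × Int :=
  match st with
  | (best, second, bestJ, j) =>
    if (match best with | none => true | some b => decide (b < v)) then
      (some v, best, j, j + 1)
    else if (match second with | none => true | some s => decide (s < v)) then
      (best, some v, bestJ, j + 1)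
    else (best, second, bestJ, j + 1)

def stepB (L : List (List Int)) (i : Int) : List (List Int) :=
  let prev := PySem.List.pyGetD L (i - 1) []
  match prev.foldl scanStep (none, none, 0, 0) with
  | (best, second, bestJ, _) =>
    (PySem.List.pyRange 0 4 1).foldl (fun L2 j =>
      let row := PySem.List.pyGetD L2 i []
      PySem.List.pySetD L2 i (PySem.List.pySetD row j (PySem.List.pyGetD row j 0 +
        (if j = bestJ then second.getD 0 else best.getD 0)))) L

def solution_alt (land : List (List Int)) : Int :=
  let n : Int := land.length
  let land2 := (PySem.List.pyRange 1 n 1).foldl stepB land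
  (PySem.List.max? (PySem.List.pyGetD land2 (-1) []) (fun y => y)).getD 0

-- ===== PRECONDITION & SPEC =====
-- Pre_solution is exactly the set of inputs on which the Python A returns (elsewhere A
-- raises IndexError or ValueError): nonempty land; a single row must be nonempty; with
-- several rows the first needs ≥ 2 columns and every later row ≥ 4 columns.
def Pre_solution (land : List (List Int)) : Prop :=
  land ≠ [] ∧ (land.length = 1 → land.headI ≠ []) ∧
    (1 < land.length → 2 ≤ land.headI.length ∧ ∀ row ∈ land.tail, 4 ≤ row.length)
instance (land : List (List Int)) : Decidable (Pre_solution land) := by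
  unfold Pre_solution; infer_instance

def pvWitness_solution : List (List Int) := [[1, 2, 3, 4], [5, 6, 7, 8], [4, 3, 2, 1]]

def Spec_solution (land : List (List Int)) (out : Int) : Prop := out = solution_alt land
instance (land : List (List Int)) (out : Int) : Decidable (Spec_solution land out) := by
  unfold Spec_solution; infer_instance

-- ===== CLAIM (what is proved, stated in full; the proofs are below) =====
def Claim_equal_solution : Prop :=
  ∀ (land : List (List Int)), Dom_solution land → Pre_solution land →
    Spec_solution land (solution land)

-- ===== LEMMAS AND PROOFS =====

def PvIsMax (xs : List Int) (m : Int) : Prop := m ∈ xs ∧ ∀ y ∈ xs, y ≤ m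

theorem maxD_of_isMax {xs : List Int} {m : Int} (h : PvIsMax xs m) :
    (PySem.List.max? xs (fun y => y)).getD 0 = m := by
  obtain ⟨hm, hub⟩ := h
  cases hmx : PySem.List.max? xs (fun y => y) with
  | none =>
    rw [PySem.List.max?_eq_none_iff] at hmx
    simp [hmx] at hm
  | some m' =>
    have h1 : m' ∈ xs := PySem.List.max?_mem hmx
    have h2 := PySem.List.max?_isMax hmx m hm
    have h3 := hub m' h1
    simp; omega

theorem isMax_append {p : List Int} {v M : Int} (h : PvIsMax p M) (hv : v ≤ M) :
    PvIsMax (p ++ [v]) M := by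
  obtain ⟨hm, hub⟩ := h
  refine ⟨List.mem_append_left _ hm, ?_⟩
  intro y hy
  rcases List.mem_append.mp hy with h' | h'
  · exact hub y h'
  · simp at h'; omega

theorem isMax_append_new {p : List Int} {v M : Int} (h : PvIsMax p M) (hv : M < v) :
    PvIsMax (p ++ [v]) v := by
  obtain ⟨hm, hub⟩ := h
  refine ⟨List.mem_append_right _ (by simp), ?_⟩
  intro y hy
  rcases List.mem_append.mp hy with h' | h'
  · exact le_of_lt (lt_of_le_of_lt (hub y h') hv)
  · simp at h'; omega

theorem isMax_singleton (v : Int) : PvIsMax [v] v := ⟨by simp, by simp⟩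

theorem isMax_append_max {p : List Int} {v s : Int} (h : PvIsMax p s) :
    PvIsMax (p ++ [v]) (max s v) := by
  obtain ⟨hm, hub⟩ := h
  by_cases hvs : v ≤ s
  · rw [max_eq_left hvs]; exact isMax_append ⟨hm, hub⟩ hvs
  · rw [max_eq_right (by omega)]; exact isMax_append_new ⟨hm, hub⟩ (by omega)

-- invariant of B's scan after processing prefix p: best = running max, bestJ its index,
-- second = max of p with position bestJ removed (none while p has fewer than 2 elements)
def ScanInv (p : List Int) (st : Option Int × Option Int × Int × Int) : Prop :=
  st.2.2.2 = (p.length : Int) ∧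
  match st.1 with
  | none => p = []
  | some M =>
    PvIsMax p M ∧ ∃ k : Nat, k < p.length ∧ st.2.2.1 = (k : Int) ∧ p[k]? = some M ∧
      (match st.2.1 with
       | none => p.length = 1
       | some s => 2 ≤ p.length ∧ PvIsMax (p.eraseIdx k) s)

theorem scanInv_step {p : List Int} {st} (h : ScanInv p st) (v : Int) :
    ScanInv (p ++ [v]) (scanStep st v) := by
  obtain ⟨best, second, bestJ, j⟩ := st
  obtain ⟨hj, hrest⟩ := h
  simp only at hj
  cases best with
  | none =>
    -- p = []
    simp only at hrest
    subst hrest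
    simp at hj
    refine ⟨by simp [scanStep]; omega, ?_⟩
    simp only [scanStep, List.nil_append]
    refine ⟨isMax_singleton v, 0, by simp, by simp; omega, by simp, ?_⟩
    cases second <;> simp
  | some M =>
    obtain ⟨hMax, k, hk, hbj, hget, hsec⟩ := hrest
    by_cases hlt : M < v
    · -- new best
      have : scanStep (some M, second, bestJ, j) v = (some v, some M, j, j + 1) := by
        simp [scanStep, hlt]
      rw [this]
      refine ⟨by simp; omega, isMax_append_new hMax hlt, p.length, by simp, by omega, ?_, ?_⟩
      · simp
      · constructor
        · have : p ≠ [] := by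
            intro h'; subst h'; simp at hk
          simp [List.length_append]
          cases p <;> simp_all
        · rw [List.eraseIdx_append_of_length_le (by omega)]
          simpa using hMax
    · -- best unchanged
      have hstep : scanStep (some M, second, bestJ, j) v =
          (some M, some (match second with | none => v | some s => max s v), bestJ, j + 1) := by
        cases second with
        | none => simp [scanStep, hlt]
        | some s =>
          by_cases hs : s < v
          · simp [scanStep, hlt, hs, max_eq_right (le_of_lt hs)]
          · have hvs : v ≤ s := by omega
            simp [scanStep, hlt, hs, max_eq_left hvs]
      rw [hstep]
      refine ⟨by simp; omega, isMax_append hMax (by omega), k, by simp; omega, hbj,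
        by rw [List.getElem?_append_left hk]; exact hget, ?_⟩
      cases second with
      | none =>
        simp only at hsec ⊢
        constructor
        · simp; omega
        · -- p = [M], k = 0
          have hk0 : k = 0 := by omega
          subst hk0
          have : p.eraseIdx 0 = [] := by
            cases p with
            | nil => simp at hk
            | cons a t => simp at hsec ⊢; omega
          rw [List.eraseIdx_append_of_lt_length (by omega)]
          rw [this]
          simp [isMax_singleton]
      | some s =>
        obtain ⟨hlen2, hsmax⟩ := hsec
        refine ⟨by simp; omega, ?_⟩
        rw [List.eraseIdx_append_of_lt_length (by omega)]
        exact isMax_append_max hsmax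

theorem scanInv_scan (prev : List Int) :
    ScanInv prev (prev.foldl scanStep (none, none, 0, 0)) := by
  have key : ∀ (rest p : List Int) (st), ScanInv p st →
      ScanInv (p ++ rest) (rest.foldl scanStep st) := by
    intro rest
    induction rest with
    | nil => intro p st h; simpa using h
    | cons v t ih =>
      intro p st h
      have := ih (p ++ [v]) (scanStep st v) (scanInv_step h v)
      simpa using this
  have h0 : ScanInv [] ((none : Option Int), (none : Option Int), (0 : Int), (0 : Int)) := by
    refine ⟨by simp, by simp⟩
  simpa using key prev [] _ h0

theorem mem_eraseIdx_of_getElem? {xs : List Int} {k n : Nat} {M : Int}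
    (hget : xs[k]? = some M) (hne : k ≠ n) : M ∈ xs.eraseIdx n := by
  rw [List.eraseIdx_eq_take_drop_succ]
  rcases Nat.lt_or_ge k n with hkn | hkn
  · exact List.mem_append_left _ (List.mem_of_getElem? (by rw [List.getElem?_take_of_lt hkn]; exact hget))
  · have hkn' : n + 1 ≤ k := by omega
    refine List.mem_append_right _ (List.mem_of_getElem? (l := xs.drop (n+1)) (i := k - (n+1)) ?_)
    rw [List.getElem?_drop]
    rw [show n + 1 + (k - (n + 1)) = k from by omega]
    exact hget

theorem isMax_eraseIdx {xs : List Int} {M : Int} {k n : Nat} (h : PvIsMax xs M)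
    (hget : xs[k]? = some M) (hne : k ≠ n) : PvIsMax (xs.eraseIdx n) M := by
  refine ⟨mem_eraseIdx_of_getElem? hget hne, ?_⟩
  intro y hy
  exact h.2 y ((xs.eraseIdx_sublist n).mem hy)

theorem addend_eq {prev : List Int} (h2 : 2 ≤ prev.length) {j : Int} (hj : 0 ≤ j)
    {best second : Option Int} {bestJ c : Int}
    (hscan : prev.foldl scanStep (none, none, 0, 0) = (best, second, bestJ, c)) :
    (PySem.List.max? (PySem.List.slice prev none (some j) ++
        PySem.List.slice prev (some (j + 1)) none) (fun y => y)).getD 0 =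
      (if j = bestJ then second.getD 0 else best.getD 0) := by
  have inv := scanInv_scan prev
  rw [hscan] at inv
  obtain ⟨-, hrest⟩ := inv
  cases best with
  | none => simp only at hrest; subst hrest; simp at h2
  | some M =>
    obtain ⟨hMax, k, hk, hbj, hget, hsec⟩ := hrest
    simp only at hbj
    cases second with
    | none => simp only at hsec; omega
    | some s =>
      obtain ⟨-, hsmax⟩ := hsec
      rw [PySem.List.slice_to prev hj, PySem.List.slice_from prev (by omega : (0:Int) ≤ j + 1),
        show (j + 1).toNat = j.toNat + 1 from by omega,
        ← List.eraseIdx_eq_take_drop_succ]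
      by_cases hjk : j = bestJ
      · rw [if_pos hjk]
        have hjt : j.toNat = k := by omega
        rw [hjt]
        simpa using maxD_of_isMax hsmax
      · rw [if_neg hjk]
        have hne : k ≠ j.toNat := by omega
        rcases Nat.lt_or_ge j.toNat prev.length with hlt | hge
        · simpa using maxD_of_isMax (isMax_eraseIdx hMax hget hne)
        · rw [List.eraseIdx_of_length_le hge]
          simpa using maxD_of_isMax hMax

theorem pyGetD_pySetD_ne {X : List (List Int)} {a b : Int} {r : List Int}
    (hne : a ≠ b) (ha : 0 ≤ a) (hb : 0 ≤ b) :
    PySem.List.pyGetD (PySem.List.pySetD X b r) a ([] : List Int) =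
      PySem.List.pyGetD X a [] := by
  rw [PySem.List.pySetD_of_nonneg X r hb, PySem.List.pyGetD_of_nonneg _ _ ha,
    PySem.List.pyGetD_of_nonneg X _ ha]
  unfold List.getD
  rw [List.getElem?_set_ne (by omega)]

theorem inner_fold_eq (i : Int) (hi : 1 ≤ i) {prev : List Int} (h2 : 2 ≤ prev.length)
    {best second : Option Int} {bestJ c : Int}
    (hscan : prev.foldl scanStep (none, none, 0, 0) = (best, second, bestJ, c)) :
    ∀ (js : List Int) (L' : List (List Int)), (∀ j ∈ js, 0 ≤ j) →
      PySem.List.pyGetD L' (i - 1) ([] : List Int) = prev →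
      js.foldl (fun L j =>
        PySem.List.pySetD L i (PySem.List.pySetD (PySem.List.pyGetD L i []) j
          (PySem.List.pyGetD (PySem.List.pyGetD L i []) j 0 +
            (PySem.List.max? (PySem.List.slice (PySem.List.pyGetD L (i-1) []) none (some j) ++
              PySem.List.slice (PySem.List.pyGetD L (i-1) []) (some (j + 1)) none)
              (fun y => y)).getD 0))) L' =
      js.foldl (fun L2 j =>
        PySem.List.pySetD L2 i (PySem.List.pySetD (PySem.List.pyGetD L2 i []) j
          (PySem.List.pyGetD (PySem.List.pyGetD L2 i []) j 0 +
            (if j = bestJ then second.getD 0 else best.getD 0)))) L' := by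
  intro js
  induction js with
  | nil => intro L' _ _; rfl
  | cons j t ih =>
    intro L' hjs hprev
    have hj : 0 ≤ j := hjs j (by simp)
    have hstep : PySem.List.pySetD L' i (PySem.List.pySetD (PySem.List.pyGetD L' i []) j
          (PySem.List.pyGetD (PySem.List.pyGetD L' i []) j 0 +
            (PySem.List.max? (PySem.List.slice (PySem.List.pyGetD L' (i-1) []) none (some j) ++
              PySem.List.slice (PySem.List.pyGetD L' (i-1) []) (some (j + 1)) none)
              (fun y => y)).getD 0)) =
        PySem.List.pySetD L' i (PySem.List.pySetD (PySem.List.pyGetD L' i []) j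
          (PySem.List.pyGetD (PySem.List.pyGetD L' i []) j 0 +
            (if j = bestJ then second.getD 0 else best.getD 0))) := by
      rw [hprev, addend_eq h2 hj hscan]
    simp only [List.foldl_cons]
    rw [hstep]
    exact ih _ (fun x hx => hjs x (by simp [hx]))
      (by rw [pyGetD_pySetD_ne (by omega) (by omega) (by omega), hprev])

theorem innerB_preserves (i : Int) (hi0 : 0 ≤ i) (best second : Option Int) (bestJ : Int) :
    ∀ (js : List Int) (L2 : List (List Int)), i < (L2.length : Int) →
      (∀ row ∈ L2, 2 ≤ row.length) →
      (js.foldl (fun L2 j =>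
        PySem.List.pySetD L2 i (PySem.List.pySetD (PySem.List.pyGetD L2 i []) j
          (PySem.List.pyGetD (PySem.List.pyGetD L2 i []) j 0 +
            (if j = bestJ then second.getD 0 else best.getD 0)))) L2).length = L2.length ∧
      (∀ row ∈ (js.foldl (fun L2 j =>
        PySem.List.pySetD L2 i (PySem.List.pySetD (PySem.List.pyGetD L2 i []) j
          (PySem.List.pyGetD (PySem.List.pyGetD L2 i []) j 0 +
            (if j = bestJ then second.getD 0 else best.getD 0)))) L2), 2 ≤ row.length) := by
  intro js
  induction js with
  | nil => intro L2 _ h; exact ⟨rfl, h⟩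
  | cons j t ih =>
    intro L2 hlen hrows
    simp only [List.foldl_cons]
    have hrow0 : PySem.List.pyGetD L2 i ([] : List Int) ∈ L2 := by
      rw [PySem.List.pyGetD_of_nonneg _ _ hi0, List.getD_eq_getElem _ _ (by omega)]
      exact List.getElem_mem _
    have hr2 : 2 ≤ (PySem.List.pyGetD L2 i ([] : List Int)).length := hrows _ hrow0
    set r := PySem.List.pySetD (PySem.List.pyGetD L2 i []) j
      (PySem.List.pyGetD (PySem.List.pyGetD L2 i []) j 0 +
        (if j = bestJ then second.getD 0 else best.getD 0)) with hr
    have hrlen : 2 ≤ r.length := by rw [hr, PySem.List.length_pySetD]; exact hr2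
    have hL' : (PySem.List.pySetD L2 i r).length = L2.length := PySem.List.length_pySetD _ _ _
    have hrows' : ∀ row ∈ PySem.List.pySetD L2 i r, 2 ≤ row.length := by
      intro row hrow
      rw [PySem.List.pySetD_of_nonneg _ _ hi0] at hrow
      rcases List.mem_or_eq_of_mem_set hrow with h' | h'
      · exact hrows _ h'
      · rw [h']; exact hrlen
    obtain ⟨e1, e2⟩ := ih (PySem.List.pySetD L2 i r) (by rw [hL']; exact hlen) hrows'
    exact ⟨by rw [e1, hL'], e2⟩

theorem outer_eq : ∀ (js : List Int) (L : List (List Int)),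
    (∀ i ∈ js, 1 ≤ i ∧ i < (L.length : Int)) → (∀ row ∈ L, 2 ≤ row.length) →
    js.foldl (fun L i => (PySem.List.pyRange 0 4 1).foldl (stepA i) L) L =
      js.foldl stepB L := by
  intro js
  induction js with
  | nil => intro L _ _; rfl
  | cons i t ih =>
    intro L hbound hrows
    obtain ⟨hi1, hiN⟩ := hbound i (by simp)
    have hprevmem : PySem.List.pyGetD L (i - 1) ([] : List Int) ∈ L := by
      rw [PySem.List.pyGetD_of_nonneg _ _ (by omega), List.getD_eq_getElem _ _ (by omega)]
      exact List.getElem_mem _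
    have h2 : 2 ≤ (PySem.List.pyGetD L (i - 1) ([] : List Int)).length := hrows _ hprevmem
    obtain ⟨⟨best, second, bestJ, c⟩, hscan⟩ :
        ∃ st, (PySem.List.pyGetD L (i - 1) ([] : List Int)).foldl scanStep (none, none, 0, 0) = st :=
      ⟨_, rfl⟩
    have hjs04 : ∀ j ∈ PySem.List.pyRange 0 4 1, (0:Int) ≤ j := by decide
    have hinner := inner_fold_eq i hi1 h2 hscan (PySem.List.pyRange 0 4 1) L hjs04 rfl
    have hA : (PySem.List.pyRange 0 4 1).foldl (stepA i) L =
        (PySem.List.pyRange 0 4 1).foldl (fun L2 j =>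
          PySem.List.pySetD L2 i (PySem.List.pySetD (PySem.List.pyGetD L2 i []) j
            (PySem.List.pyGetD (PySem.List.pyGetD L2 i []) j 0 +
              (if j = bestJ then second.getD 0 else best.getD 0)))) L := by
      rw [← hinner]; rfl
    have hB : stepB L i = (PySem.List.pyRange 0 4 1).foldl (fun L2 j =>
          PySem.List.pySetD L2 i (PySem.List.pySetD (PySem.List.pyGetD L2 i []) j
            (PySem.List.pyGetD (PySem.List.pyGetD L2 i []) j 0 +
              (if j = bestJ then second.getD 0 else best.getD 0)))) L := by
      simp only [stepB]
      rw [hscan]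
    obtain ⟨hlen', hrows'⟩ := innerB_preserves i (by omega) best second bestJ
      (PySem.List.pyRange 0 4 1) L (by omega) hrows
    simp only [List.foldl_cons]
    rw [hA, ← hB]
    apply ih
    · intro x hx
      obtain ⟨hx1, hx2⟩ := hbound x (List.mem_cons_of_mem _ hx)
      refine ⟨hx1, ?_⟩
      rw [hB, hlen']
      exact hx2
    · rw [hB]; exact hrows'

-- ===== VERDICT (by name: the statement is the Claim_ definition above) =====
theorem solution_spec : Claim_equal_solution := by
  intro land hdom hpre
  unfold Spec_solution
  obtain ⟨hne, hone, hmulti⟩ := hpre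
  suffices hf : (PySem.List.pyRange 1 (land.length : Int) 1).foldl
      (fun L i => (PySem.List.pyRange 0 4 1).foldl (stepA i) L) land =
      (PySem.List.pyRange 1 (land.length : Int) 1).foldl stepB land by
    simp only [solution, solution_alt, hf]
  rcases Nat.lt_or_ge 1 land.length with hlen | hlen
  · obtain ⟨hhead, htail⟩ := hmulti hlen
    apply outer_eq
    · intro i hi
      have := PySem.List.mem_pyRange_one.mp hi
      omega
    · intro row hrow
      cases land with
      | nil => simp at hrow
      | cons a t =>
        rcases List.mem_cons.mp hrow with h' | h'
        · subst h'; simpa using hhead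
        · have := htail row (by simpa using h')
          omega
  · have h1 : land.length = 1 := by
      cases land with
      | nil => simp at hne
      | cons a t => simp at hlen ⊢; omega
    rw [h1]
    rfl
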